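-- pv_equiv track=rewrite | github.com/Ehenew/leetcode-problems-solved | 2305-fair-distribution-of-cookies/2305-fair-distribution-of-cookies.py | distributeCookies
-- ===== SOURCE A (Python) =====
-- from typing import List
--
-- def distributeCookies(cookies: List[int], k: int) -> int:
--     n = len(cookies)
--     distribution_bag = [0] * k
--
--     def dfs(i, distribution_bag):
--         if i == n:
--             return max(distribution_bag)
--
--         min_unfairness = float('inf')
--
--         for child in range(k):
--             distribution_bag[child] += cookies[i]
--             min_unfairness = min(min_unfairness, dfs(i+1, distribution_bag))
--             distribution_bag[child] -= cookies[i]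
--
--             if distribution_bag[child] == 0:
--                 break
--
--         return min_unfairness
--
--
--     return dfs(0, distribution_bag)
-- ===== SOURCE B (Python) =====
-- from typing import List
--
-- def distributeCookies(cookies: List[int], k: int) -> int:
--     # Breadth-first dynamic programming over the set of DISTINCT bag-sum states.
--     # A state is the tuple of current bag sums; each cookie expands every state
--     # into the placements up to and including the first empty bag (the same
--     # symmetry rule A's backtracking uses), and duplicate states are merged.
--     frontier = {tuple([0] * k)}
--     for c in cookies:
--         nxt = set()
--         for state in frontier:
--             for j in range(k):
--                 nxt.add(state[:j] + (state[j] + c,) + state[j + 1:])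
--                 if state[j] == 0:
--                     break
--         frontier = nxt
--     return min(max(state) for state in frontier)
-- ===== Notes on version B (the rewrite author's own statement) =====
-- stated objective: alternative
-- what changed: Replaces A's depth-first backtracking recursion over one mutable bag array by a breadth-first dynamic-programming pass that folds the cookies over a SET of distinct bag-sum states (same first-empty-bag placement rule), merging duplicate states so identical subtrees are expanded once.
-- outside the precondition, e.g. on distributeCookies([1], 0): A returns inf, B raises ValueError; on distributeCookies([], 0): A raises ValueError, B raises ValueError
import Mathlib
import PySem

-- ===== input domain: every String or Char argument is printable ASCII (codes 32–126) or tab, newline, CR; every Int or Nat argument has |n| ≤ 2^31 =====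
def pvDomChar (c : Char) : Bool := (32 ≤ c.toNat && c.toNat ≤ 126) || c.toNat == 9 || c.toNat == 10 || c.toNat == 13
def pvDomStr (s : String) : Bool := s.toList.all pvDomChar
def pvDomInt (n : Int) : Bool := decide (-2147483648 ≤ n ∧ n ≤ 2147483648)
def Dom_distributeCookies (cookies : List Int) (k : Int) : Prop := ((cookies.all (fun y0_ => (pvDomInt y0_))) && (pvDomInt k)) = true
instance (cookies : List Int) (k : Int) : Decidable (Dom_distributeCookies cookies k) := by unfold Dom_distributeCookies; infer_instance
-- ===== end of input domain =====

-- B replaces A's depth-first backtracking by a breadth-first DP over the set of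
-- distinct bag-sum states (duplicates merged); equivalence is about the return value.

-- ===== PORT A =====
-- max(bag) (bag is nonempty whenever k >= 1; the default is never used under Pre_)
def pyMax (l : List Int) : Int := (PySem.List.max? l (fun x => x)).getD 0

-- the inner 'for child in range(k)' loop with its running min and break-on-empty-bag;
-- min_unfairness = float('inf') is modelled as 'none'
def loopA (next : List Int → Int) (c : Int) (bag : List Int) :
    Nat → Nat → Option Int → Option Int
  | 0, _, acc => acc
  | rem + 1, child, acc =>
      let v := next (bag.set child (bag.getD child 0 + c))
      let acc' : Option Int := some (match acc with | none => v | some m => min m v)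
      if bag.getD child 0 == 0 then acc'
      else loopA next c bag rem (child + 1) acc'

-- dfs(i, bag); fuel = n - i, so fuel = 0 is exactly i == n
def dfsA (cookies : List Int) (k : Nat) : Nat → Nat → List Int → Int
  | 0, _, bag => pyMax bag
  | fuel + 1, i, bag =>
      (loopA (dfsA cookies k fuel (i + 1)) (cookies.getD i 0) bag k 0 none).getD 0

def distributeCookies (cookies : List Int) (k : Int) : Int :=
  dfsA cookies k.toNat cookies.length 0 (List.replicate k.toNat 0)

-- ===== PORT B =====
-- the placements of cookie c into state S: bags up to and including the first empty one
def expandB (c : Int) (S : List Int) : Nat → Nat → List (List Int)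
  | 0, _ => []
  | rem + 1, j =>
      S.set j (S.getD j 0 + c) ::
        (if S.getD j 0 == 0 then [] else expandB c S rem (j + 1))

-- one cookie: nxt = set(); for state in frontier: for the placements: nxt.add(...)
def stepB (k : Nat) (c : Int) (F : List (List Int)) : List (List Int) :=
  F.foldl (fun acc S => (expandB c S k 0).foldl PySem.Set.add acc) PySem.Set.empty

def distributeCookies_alt (cookies : List Int) (k : Int) : Int :=
  let F := cookies.foldl (fun F c => stepB k.toNat c F)
    (PySem.Set.ofList [List.replicate k.toNat 0])
  (PySem.List.min? (F.map pyMax) (fun x => x)).getD 0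

-- ===== PRECONDITION & SPEC =====
-- Pre_ excludes k <= 0, where A returns float('inf') (not an int) for nonempty cookies
-- and raises ValueError (max of empty list) for empty cookies; B raises ValueError there.
def Pre_distributeCookies (cookies : List Int) (k : Int) : Prop := 1 ≤ k
instance (cookies : List Int) (k : Int) : Decidable (Pre_distributeCookies cookies k) := by
  unfold Pre_distributeCookies; infer_instance
def pvWitness_distributeCookies : List Int × Int := ([8, 15, 10, 20, 8], 2)

def Spec_distributeCookies (cookies : List Int) (k : Int) (out : Int) : Prop :=
  out = distributeCookies_alt cookies k
instance (cookies : List Int) (k : Int) (out : Int) : Decidable (Spec_distributeCookies cookies k out) := by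
  unfold Spec_distributeCookies; infer_instance

-- ===== CLAIM (what is proved, stated in full; the proofs are below) =====
def Claim_equal_distributeCookies : Prop := ∀ (cookies : List Int) (k : Int), Dom_distributeCookies cookies k → Pre_distributeCookies cookies k → Spec_distributeCookies cookies k (distributeCookies cookies k)

-- ===== LEMMAS AND PROOFS =====

-- min over a list of Ints, as both Pythons' min/running-min compute it
def omin (l : List Int) : Option Int := PySem.List.min? l (fun x => x)

-- 'min' on Option Int, with none = float('inf')
def ocomb (a b : Option Int) : Option Int :=
  match a, b with
  | none, b => b
  | a, none => a
  | some x, some y => some (min x y)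

theorem ocomb_assoc (a b c : Option Int) : ocomb (ocomb a b) c = ocomb a (ocomb b c) := by
  cases a <;> cases b <;> cases c <;> simp [ocomb, min_assoc]

theorem ocomb_none_right (a : Option Int) : ocomb a none = a := by
  cases a <;> rfl

theorem omin_nil : omin [] = none :=
  (PySem.List.min?_eq_none_iff [] (fun x => x)).mpr rfl

theorem foldl_min_min (t : List Int) (a b : Int) :
    t.foldl min (min a b) = min a (t.foldl min b) := by
  induction t generalizing b with
  | nil => simp
  | cons y t ih => simp only [List.foldl_cons, min_assoc, ih]

theorem omin_cons (x : Int) (t : List Int) : omin (x :: t) = ocomb (some x) (omin t) := by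
  cases t with
  | nil =>
      rw [omin_nil, ocomb_none_right]
      simp [omin, PySem.List.min?_id_cons]
  | cons y t =>
      simp [omin, PySem.List.min?_id_cons, ocomb, List.foldl_cons, foldl_min_min]

theorem omin_append (l₁ l₂ : List Int) : omin (l₁ ++ l₂) = ocomb (omin l₁) (omin l₂) := by
  induction l₁ with
  | nil => simp [omin_nil, ocomb]
  | cons x t ih => rw [List.cons_append, omin_cons, omin_cons, ih, ocomb_assoc]

theorem omin_char (l : List Int) (m : Int) :
    omin l = some m ↔ m ∈ l ∧ ∀ y ∈ l, m ≤ y := by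
  constructor
  · intro h
    exact ⟨PySem.List.min?_mem h, fun y hy => PySem.List.min?_isMin h y hy⟩
  · rintro ⟨hm, hle⟩
    cases hmin : omin l with
    | none =>
        rw [omin, PySem.List.min?_eq_none_iff] at hmin
        subst hmin; cases hm
    | some m' =>
        have h1 : m' ≤ m := PySem.List.min?_isMin hmin m hm
        have h2 : m ≤ m' := hle m' (PySem.List.min?_mem hmin)
        rw [le_antisymm h1 h2]

theorem omin_congr (l₁ l₂ : List Int) (h : ∀ x, x ∈ l₁ ↔ x ∈ l₂) : omin l₁ = omin l₂ := by
  cases h₂ : omin l₂ with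
  | none =>
      rw [omin, PySem.List.min?_eq_none_iff] at h₂ ⊢
      subst h₂
      cases l₁ with
      | nil => rfl
      | cons x t => exact absurd ((h x).mp (List.mem_cons_self)) (by simp)
  | some m =>
      rw [omin_char] at h₂ ⊢
      exact ⟨(h m).mpr h₂.1, fun y hy => h₂.2 y ((h y).mp hy)⟩

-- the A-side loop is the min of the recursive calls over exactly B's placement list
theorem loopA_eq (next : List Int → Int) (c : Int) (bag : List Int) :
    ∀ (rem child : Nat) (acc : Option Int),
      loopA next c bag rem child acc = ocomb acc (omin ((expandB c bag rem child).map next)) := by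
  intro rem
  induction rem with
  | zero =>
      intro child acc
      rw [show loopA next c bag 0 child acc = acc from rfl,
        show expandB c bag 0 child = [] from rfl]
      rw [List.map_nil, omin_nil, ocomb_none_right]
  | succ rem ih =>
      intro child acc
      simp only [loopA, expandB]
      by_cases h : bag.getD child 0 == 0
      · simp only [h, if_true, List.map_cons, List.map_nil, omin_cons,
          omin_nil, ocomb_none_right]
        cases acc <;> rfl
      · simp only [h, List.map_cons, omin_cons, ih, ← ocomb_assoc]
        cases acc <;> rfl

theorem expandB_ne_nil (c : Int) (S : List Int) (k : Nat) (hk : 1 ≤ k) :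
    expandB c S k 0 ≠ [] := by
  cases k with
  | zero => omega
  | succ k => simp [expandB]

theorem dfsA_succ (cookies : List Int) (k : Nat) (fuel i : Nat) (bag : List Int) :
    dfsA cookies k (fuel + 1) i bag =
      (omin ((expandB (cookies.getD i 0) bag k 0).map (dfsA cookies k fuel (i + 1)))).getD 0 := by
  rw [dfsA, loopA_eq]; rfl

theorem mem_stepB (k : Nat) (c : Int) (F : List (List Int)) (x : List Int) :
    x ∈ stepB k c F ↔ ∃ S ∈ F, x ∈ expandB c S k 0 := by
  have main : ∀ (F : List (List Int)) (acc : List (List Int)),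
      x ∈ F.foldl (fun acc S => (expandB c S k 0).foldl PySem.Set.add acc) acc ↔
        x ∈ acc ∨ ∃ S ∈ F, x ∈ expandB c S k 0 := by
    intro F
    induction F with
    | nil => simp
    | cons S F ih =>
        intro acc
        rw [List.foldl_cons, ih]
        have : x ∈ (expandB c S k 0).foldl PySem.Set.add acc ↔
            x ∈ acc ∨ x ∈ expandB c S k 0 := by
          rw [show (expandB c S k 0).foldl PySem.Set.add acc
                = PySem.Set.update acc (expandB c S k 0) from rfl]
          exact PySem.Set.mem_update acc (expandB c S k 0) x
        rw [this]
        constructor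
        · rintro (⟨h | h⟩ | ⟨T, hT, hx⟩)
          · exact Or.inl h
          · exact Or.inr ⟨S, List.mem_cons_self, h⟩
          · exact Or.inr ⟨T, List.mem_cons_of_mem _ hT, hx⟩
        · rintro (h | ⟨T, hT, hx⟩)
          · exact Or.inl (Or.inl h)
          · rcases List.mem_cons.mp hT with rfl | hT
            · exact Or.inl (Or.inr hx)
            · exact Or.inr ⟨T, hT, hx⟩
  have := main F PySem.Set.empty
  simpa [stepB, PySem.Set.empty] using this

theorem stepB_ne_nil (k : Nat) (c : Int) (F : List (List Int)) (hk : 1 ≤ k) (hF : F ≠ []) :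
    stepB k c F ≠ [] := by
  obtain ⟨S, hS⟩ := List.exists_mem_of_ne_nil F hF
  obtain ⟨x, hx⟩ := List.exists_mem_of_ne_nil _ (expandB_ne_nil c S k hk)
  intro h
  have : x ∈ stepB k c F := (mem_stepB k c F x).mpr ⟨S, hS, hx⟩
  rw [h] at this; cases this

-- min over a frontier of the per-state minima = min over the flattened placements
theorem omin_flat (g : List Int → Int) (c : Int) (k : Nat) (hk : 1 ≤ k) (F : List (List Int)) :
    omin (F.map (fun S => (omin ((expandB c S k 0).map g)).getD 0)) =
      omin ((F.flatMap (fun S => expandB c S k 0)).map g) := by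
  induction F with
  | nil => rfl
  | cons S F ih =>
      rw [List.map_cons, omin_cons, List.flatMap_cons, List.map_append, omin_append, ih]
      obtain ⟨x, hx⟩ := List.exists_mem_of_ne_nil _ (expandB_ne_nil c S k hk)
      cases hmin : omin ((expandB c S k 0).map g) with
      | none =>
          rw [omin, PySem.List.min?_eq_none_iff, List.map_eq_nil_iff] at hmin
          exact absurd hmin (expandB_ne_nil c S k hk)
      | some m => simp

-- MAIN invariant: folding B's step over the remaining cookies preserves the
-- minimum of A's dfs values over the frontier (frontier compared by membership)
theorem main_inv (cookies : List Int) (k : Nat) (hk : 1 ≤ k) :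
    ∀ (rest : List Int) (i : Nat) (F : List (List Int)), F ≠ [] →
      rest = cookies.drop i →
      omin ((rest.foldl (fun F c => stepB k c F) F).map pyMax) =
        omin (F.map (dfsA cookies k rest.length i)) := by
  intro rest
  induction rest with
  | nil =>
      intro i F hF _
      rfl
  | cons c rest ih =>
      intro i F hF hdrop
      have hget : cookies[i]? = some c := by
        rw [← List.head?_drop, ← hdrop]; rfl
      have hc : cookies.getD i 0 = c := by
        rw [List.getD_eq_getElem?_getD, hget]; rfl
      have hrest : rest = cookies.drop (i + 1) := by
        have h2 : List.drop (i + 1) cookies = List.drop 1 (List.drop i cookies) := by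
          rw [List.drop_drop, Nat.add_comm]
        rw [h2, ← hdrop]
        rfl
      rw [List.foldl_cons, ih (i + 1) (stepB k c F) (stepB_ne_nil k c F hk hF) hrest]
      have e1 : omin ((stepB k c F).map (dfsA cookies k rest.length (i + 1)))
          = omin ((F.flatMap (fun S => expandB c S k 0)).map
              (dfsA cookies k rest.length (i + 1))) := by
        apply omin_congr
        intro x
        constructor <;> intro hx
        · obtain ⟨a, ha, rfl⟩ := List.mem_map.mp hx
          exact List.mem_map.mpr ⟨a, List.mem_flatMap.mpr ((mem_stepB k c F a).mp ha), rfl⟩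
        · obtain ⟨a, ha, rfl⟩ := List.mem_map.mp hx
          exact List.mem_map.mpr ⟨a, (mem_stepB k c F a).mpr (List.mem_flatMap.mp ha), rfl⟩
      have e3 : dfsA cookies k (c :: rest).length i = fun S =>
          (omin ((expandB c S k 0).map (dfsA cookies k rest.length (i + 1)))).getD 0 := by
        funext S
        rw [List.length_cons, dfsA_succ, hc]
      rw [e1, ← omin_flat (dfsA cookies k rest.length (i + 1)) c k hk F, e3]

-- ===== VERDICT (by name: the statement is the Claim_ definition above) =====
theorem distributeCookies_spec : Claim_equal_distributeCookies := by
  intro cookies k _ hpre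
  unfold Spec_distributeCookies distributeCookies distributeCookies_alt
  have hk : 1 ≤ k.toNat := by
    unfold Pre_distributeCookies at hpre; omega
  have h := main_inv cookies k.toNat hk cookies 0
    [List.replicate k.toNat 0] (by simp) (by rw [List.drop_zero])
  have hr : omin ([List.replicate k.toNat 0].map (dfsA cookies k.toNat cookies.length 0))
      = some (dfsA cookies k.toNat cookies.length 0 (List.replicate k.toNat 0)) := by
    simp [omin, PySem.List.min?_id_cons]
  rw [hr] at h
  exact (congrArg (fun o => o.getD 0) h).symm
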